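-- pv_equiv track=rewrite | github.com/Herotank1234/AdventOfCode | 2020/q12.py | part2
-- ===== SOURCE A (Python) =====
-- def part2(instr):
--     wayX, wayY = 10, 1
--     x, y = 0, 0
--     for (op, val) in instr:
--         if op == "F":
--             x += (val * wayX)
--             y += (val * wayY)
--         elif op == "E":
--             wayX += val
--         elif op == "S":
--             wayY -= val
--         elif op == "W":
--             wayX -= val
--         elif op == "N":
--             wayY += val
--         elif op == "L":
--             reps = val // 90
--             for _ in range(reps):
--                 tmp = wayX
--                 wayX = wayY * -1
--                 wayY = tmp
--         elif op == "R":
--             reps = val // 90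
--             for _ in range(reps):
--                 tmp = wayX * -1
--                 wayX = wayY
--                 wayY = tmp
--     return abs(x) + abs(y)
-- ===== SOURCE B (Python) =====
-- # Backward pass: compose the whole instruction list into one affine map
-- # pos_final = m * waypoint_0 + b, with m a Gaussian integer (rotations and the
-- # F-multipliers commute into a single Z[i] coefficient), then apply it to (10, 1).
-- def part2(instr):
--     def gmul(p, q):
--         return (p[0] * q[0] - p[1] * q[1], p[0] * q[1] + p[1] * q[0])
--
--     DIRS = {"E": (1, 0), "N": (0, 1), "W": (-1, 0), "S": (0, -1)}
--     ROT = [(1, 0), (0, 1), (-1, 0), (0, -1)]  # powers of i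
--
--     m = (0, 0)   # Gaussian-integer multiplier of the incoming waypoint
--     b = (0, 0)   # constant offset contributed to the final position
--     for op, val in reversed(instr):
--         if op == "F":
--             m = (m[0] + val, m[1])
--         elif op in DIRS:
--             d = gmul(m, DIRS[op])
--             b = (b[0] + val * d[0], b[1] + val * d[1])
--         elif op == "L" or op == "R":
--             k = (val // 90) % 4 if op == "L" else (-(val // 90)) % 4
--             m = gmul(m, ROT[k])
--     x, y = gmul(m, (10, 1))
--     return abs(x + b[0]) + abs(y + b[1])
-- ===== Notes on version B (the rewrite author's own statement) =====
-- stated objective: alternative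
-- what changed: B runs backwards over the instructions, composing them into a single affine map pos = m*waypoint0 + b with a Gaussian-integer coefficient m (rotations become multiplication by a power of i, reduced mod 4), instead of A's forward state simulation that rotates the waypoint one quarter-turn per 90 degrees; Pre_ restricts to the task's natural domain of nonnegative rotation angles, since A silently ignores negative L/R angles (empty range) while B rotates the other way.
-- outside the precondition, e.g. on part2([('L', -90), ('N', 1), ('F', 1)]): A returns 12, B returns 10
import Mathlib
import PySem

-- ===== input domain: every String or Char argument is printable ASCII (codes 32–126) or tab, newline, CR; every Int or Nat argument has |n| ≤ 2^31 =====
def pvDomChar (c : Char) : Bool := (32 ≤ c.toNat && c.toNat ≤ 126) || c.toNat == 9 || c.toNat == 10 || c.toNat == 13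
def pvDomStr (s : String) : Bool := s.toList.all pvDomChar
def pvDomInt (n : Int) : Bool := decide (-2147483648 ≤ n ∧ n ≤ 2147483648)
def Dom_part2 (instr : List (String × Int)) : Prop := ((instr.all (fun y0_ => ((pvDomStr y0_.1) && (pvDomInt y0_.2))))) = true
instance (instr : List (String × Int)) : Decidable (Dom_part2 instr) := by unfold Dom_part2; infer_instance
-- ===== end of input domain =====

-- B composes the instruction list BACKWARDS into one affine map pos = m * waypoint0 + b
-- over the Gaussian integers (rotations are multiplications by powers of i), instead
-- of A's forward simulation that rotates the waypoint one quarter turn per 90 degrees.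

-- ===== PORT A =====
-- loop state: ((wayX, wayY), (x, y))
def part2Step (st : (Int × Int) × Int × Int) (p : String × Int) : (Int × Int) × Int × Int :=
  let wayX := st.1.1; let wayY := st.1.2; let x := st.2.1; let y := st.2.2
  let op := p.1; let val := p.2
  if op == "F" then ((wayX, wayY), (x + val * wayX, y + val * wayY))
  else if op == "E" then ((wayX + val, wayY), (x, y))
  else if op == "S" then ((wayX, wayY - val), (x, y))
  else if op == "W" then ((wayX - val, wayY), (x, y))
  else if op == "N" then ((wayX, wayY + val), (x, y))
  else if op == "L" then
    let reps := PySem.Int.floordiv val 90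
    ((PySem.List.pyRange 0 reps 1).foldl (fun (w : Int × Int) _ => (-w.2, w.1)) (wayX, wayY), (x, y))
  else if op == "R" then
    let reps := PySem.Int.floordiv val 90
    ((PySem.List.pyRange 0 reps 1).foldl (fun (w : Int × Int) _ => (w.2, -w.1)) (wayX, wayY), (x, y))
  else st

def part2 (instr : List (String × Int)) : Int :=
  let s := instr.foldl part2Step ((10, 1), (0, 0))
  |s.2.1| + |s.2.2|

-- ===== PORT B =====
-- Gaussian-integer multiplication (a, b) = a + b*i
def gmul (p q : Int × Int) : Int × Int := (p.1 * q.1 - p.2 * q.2, p.1 * q.2 + p.2 * q.1)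

def dirsB : PySem.Dict String (Int × Int) :=
  PySem.Dict.ofList [("E", (1, 0)), ("N", (0, 1)), ("W", (-1, 0)), ("S", (0, -1))]

def rotB : List (Int × Int) := [(1, 0), (0, 1), (-1, 0), (0, -1)]  -- powers of i

-- loop state: (m, b); .getD is a totality guard for the list lookup (k is always 0..3)
def part2AltStep (st : (Int × Int) × Int × Int) (p : String × Int) : (Int × Int) × Int × Int :=
  let m := st.1; let b := st.2; let op := p.1; let val := p.2
  if op == "F" then ((m.1 + val, m.2), b)
  else
    match dirsB.get? op with
    | some dd =>
      let d := gmul m dd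
      (m, (b.1 + val * d.1, b.2 + val * d.2))
    | none =>
      if op == "L" || op == "R" then
        let k : Int := if op == "L" then PySem.Int.mod (PySem.Int.floordiv val 90) 4
                       else PySem.Int.mod (-(PySem.Int.floordiv val 90)) 4
        (gmul m ((PySem.List.pyGet? rotB k).getD (1, 0)), b)
      else st

def part2_alt (instr : List (String × Int)) : Int :=
  let s := instr.reverse.foldl part2AltStep ((0, 0), (0, 0))
  let w := gmul s.1 (10, 1)
  |w.1 + s.2.1| + |w.2 + s.2.2|

-- ===== PRECONDITION & SPEC =====
-- Pre_ restricts to the task's natural domain of nonnegative rotation angles: on a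
-- negative L/R angle A silently does nothing (its range() is empty, an accident of the
-- implementation) while B naturally rotates the other way.
def Pre_part2 (instr : List (String × Int)) : Prop :=
  ∀ p ∈ instr, (p.1 = "L" ∨ p.1 = "R") → 0 ≤ p.2
instance (instr : List (String × Int)) : Decidable (Pre_part2 instr) := by unfold Pre_part2; infer_instance

def pvWitness_part2 : (List (String × Int)) := [("F", 10), ("R", 90), ("N", 3), ("F", 7), ("L", 180)]

def Spec_part2 (instr : List (String × Int)) (out : Int) : Prop := out = part2_alt instr
instance (instr : List (String × Int)) (out : Int) : Decidable (Spec_part2 instr out) := by unfold Spec_part2; infer_instance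

-- ===== CLAIM (what is proved, stated in full; the proofs are below) =====
def Claim_equal_part2 : Prop := ∀ (instr : List (String × Int)), Dom_part2 instr → Pre_part2 instr → Spec_part2 instr (part2 instr)

-- ===== LEMMAS AND PROOFS =====

theorem dirsB_get (op : String) :
    dirsB.get? op =
      if op == "E" then some ((1 : Int), (0 : Int))
      else if op == "N" then some (0, 1)
      else if op == "W" then some (-1, 0)
      else if op == "S" then some (0, -1)
      else none := by
  have h : dirsB = PySem.Dict.mk [("E", (1, 0)), ("N", (0, 1)), ("W", (-1, 0)), ("S", (0, -1))] := by rfl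
  rw [h]
  simp only [PySem.Dict.get?_mk_cons]
  have h0 : (PySem.Dict.mk ([] : List (String × (Int × Int)))).get? op = none := by
    simp [PySem.Dict.get?]
  rw [h0]
  simp [BEq.comm]

theorem gmul_assoc (a b c : Int × Int) : gmul (gmul a b) c = gmul a (gmul b c) := by
  simp only [gmul, Prod.mk.injEq]; constructor <;> ring

-- a fold that ignores the list's elements is an iterate
theorem foldl_const_iterate {α β : Type} (f : α → α) (l : List β) (w : α) :
    l.foldl (fun a _ => f a) w = f^[l.length] w := by
  induction l generalizing w with
  | nil => rfl
  | cons b t ih => simp [List.foldl_cons, ih, Function.iterate_succ_apply]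

theorem rotL_four (w : Int × Int) :
    (fun (w : Int × Int) => (-w.2, w.1))^[4] w = w := by
  cases w; simp [Function.iterate_succ_apply]

theorem rotR_four (w : Int × Int) :
    (fun (w : Int × Int) => (w.2, -w.1))^[4] w = w := by
  cases w; simp [Function.iterate_succ_apply]

theorem iterate_mod_four {f : Int × Int → Int × Int}
    (h4 : ∀ w, f^[4] w = w) (n : Nat) (w : Int × Int) :
    f^[n] w = f^[n % 4] w := by
  have key : ∀ q r w, f^[4 * q + r] w = f^[r] w := by
    intro q
    induction q with
    | zero => intro r w; simp
    | succ q ih =>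
      intro r w
      have h : 4 * (q + 1) + r = (4 * q + r) + 4 := by ring
      rw [h, Function.iterate_add_apply, h4, ih]
  have := key (n / 4) (n % 4) w
  rwa [Nat.div_add_mod] at this

-- A's left-rotation loop equals multiplying by i^(q mod 4), for q ≥ 0
theorem rotL_gmul (q : Int) (hq : 0 ≤ q) (w : Int × Int) :
    (PySem.List.pyRange 0 q 1).foldl (fun (w : Int × Int) _ => (-w.2, w.1)) w =
      gmul ((PySem.List.pyGet? rotB (PySem.Int.mod q 4)).getD (1, 0)) w := by
  rw [foldl_const_iterate, PySem.List.length_pyRange_one, iterate_mod_four rotL_four]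
  obtain ⟨n, rfl⟩ := Int.eq_ofNat_of_zero_le hq
  have hn : ((n : Int) - 0).toNat = n := by omega
  rw [hn]
  have h : PySem.Int.mod ((n : Nat) : Int) 4 = ((n % 4 : Nat) : Int) := by
    exact_mod_cast PySem.Int.mod_natCast n 4
  rw [h]
  have h4 : n % 4 = 0 ∨ n % 4 = 1 ∨ n % 4 = 2 ∨ n % 4 = 3 := by omega
  rcases h4 with hr | hr | hr | hr <;> rw [hr] <;> cases w <;>
    simp [Function.iterate_succ_apply, rotB, gmul, PySem.List.pyGet?, PySem.List.pyIdx?]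

-- A's right-rotation loop equals multiplying by i^((-q) mod 4), for q ≥ 0
theorem rotR_gmul (q : Int) (hq : 0 ≤ q) (w : Int × Int) :
    (PySem.List.pyRange 0 q 1).foldl (fun (w : Int × Int) _ => (w.2, -w.1)) w =
      gmul ((PySem.List.pyGet? rotB (PySem.Int.mod (-q) 4)).getD (1, 0)) w := by
  rw [foldl_const_iterate, PySem.List.length_pyRange_one, iterate_mod_four rotR_four]
  obtain ⟨n, rfl⟩ := Int.eq_ofNat_of_zero_le hq
  have hn : ((n : Int) - 0).toNat = n := by omega
  rw [hn]
  have hemod := PySem.Int.mod_eq_emod_of_pos (a := -(n : Int)) (b := 4) (by norm_num)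
  have h4 : n % 4 = 0 ∨ n % 4 = 1 ∨ n % 4 = 2 ∨ n % 4 = 3 := by omega
  rcases h4 with hr | hr | hr | hr <;> rw [hr] <;>
    [ (have hk : PySem.Int.mod (-((n : Nat) : Int)) 4 = 0 := by rw [hemod]; omega);
      (have hk : PySem.Int.mod (-((n : Nat) : Int)) 4 = 3 := by rw [hemod]; omega);
      (have hk : PySem.Int.mod (-((n : Nat) : Int)) 4 = 2 := by rw [hemod]; omega);
      (have hk : PySem.Int.mod (-((n : Nat) : Int)) 4 = 1 := by rw [hemod]; omega) ] <;>
    rw [hk] <;> cases w <;>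
    simp [Function.iterate_succ_apply, rotB, gmul, PySem.List.pyGet?, PySem.List.pyIdx?]

-- B's backward affine composition (foldl over the reversed list, as the port writes it)
def affB (l : List (String × Int)) : (Int × Int) × Int × Int :=
  l.foldr (fun p acc => part2AltStep acc p) ((0, 0), (0, 0))

-- main invariant: A's forward run from (w, p) lands at p + m*w + b, where (m, b) = affB l
theorem affB_correct (l : List (String × Int)) (hpre : Pre_part2 l) (w p : Int × Int) :
    (l.foldl part2Step (w, p)).2 =
      (p.1 + (gmul (affB l).1 w).1 + (affB l).2.1,
       p.2 + (gmul (affB l).1 w).2 + (affB l).2.2) := by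
  induction l generalizing w p with
  | nil => cases p; simp [affB, gmul]
  | cons hd t ih =>
    obtain ⟨op, val⟩ := hd
    have hpret : Pre_part2 t := fun q hq => hpre q (List.mem_cons_of_mem _ hq)
    have haff : affB ((op, val) :: t) = part2AltStep (affB t) (op, val) := by
      simp [affB, List.foldr_cons]
    rw [List.foldl_cons, haff]
    by_cases hF : op = "F"
    · subst hF
      rw [show part2Step (w, p) ("F", val) = ((w.1, w.2), (p.1 + val * w.1, p.2 + val * w.2)) by
        cases w; cases p; simp [part2Step]]
      rw [ih hpret]
      simp [part2AltStep, gmul, Prod.ext_iff]; constructor <;> ring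
    by_cases hE : op = "E"
    · subst hE
      rw [show part2Step (w, p) ("E", val) = ((w.1 + val, w.2), (p.1, p.2)) by
        cases w; cases p; simp [part2Step]]
      rw [ih hpret]
      simp [part2AltStep, dirsB_get, gmul, Prod.ext_iff]; constructor <;> ring
    by_cases hS : op = "S"
    · subst hS
      rw [show part2Step (w, p) ("S", val) = ((w.1, w.2 - val), (p.1, p.2)) by
        cases w; cases p; simp [part2Step]]
      rw [ih hpret]
      simp [part2AltStep, dirsB_get, gmul, Prod.ext_iff]; constructor <;> ring
    by_cases hW : op = "W"
    · subst hW
      rw [show part2Step (w, p) ("W", val) = ((w.1 - val, w.2), (p.1, p.2)) by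
        cases w; cases p; simp [part2Step]]
      rw [ih hpret]
      simp [part2AltStep, dirsB_get, gmul, Prod.ext_iff]; constructor <;> ring
    by_cases hN : op = "N"
    · subst hN
      rw [show part2Step (w, p) ("N", val) = ((w.1, w.2 + val), (p.1, p.2)) by
        cases w; cases p; simp [part2Step]]
      rw [ih hpret]
      simp [part2AltStep, dirsB_get, gmul, Prod.ext_iff]; constructor <;> ring
    by_cases hL : op = "L"
    · subst hL
      have hval : 0 ≤ val := hpre ("L", val) List.mem_cons_self (Or.inl rfl)
      have hq : 0 ≤ PySem.Int.floordiv val 90 := by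
        rw [PySem.Int.floordiv_eq_ediv_of_pos (by omega)]; omega
      rw [show part2Step (w, p) ("L", val) =
          ((PySem.List.pyRange 0 (PySem.Int.floordiv val 90) 1).foldl
              (fun (w : Int × Int) _ => (-w.2, w.1)) w, (p.1, p.2)) by
        cases p; simp [part2Step]]
      rw [ih hpret, rotL_gmul _ hq]
      simp only [part2AltStep, dirsB_get]
      simp [gmul_assoc]
    by_cases hR : op = "R"
    · subst hR
      have hval : 0 ≤ val := hpre ("R", val) List.mem_cons_self (Or.inr rfl)
      have hq : 0 ≤ PySem.Int.floordiv val 90 := by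
        rw [PySem.Int.floordiv_eq_ediv_of_pos (by omega)]; omega
      rw [show part2Step (w, p) ("R", val) =
          ((PySem.List.pyRange 0 (PySem.Int.floordiv val 90) 1).foldl
              (fun (w : Int × Int) _ => (w.2, -w.1)) w, (p.1, p.2)) by
        cases p; simp [part2Step]]
      rw [ih hpret, rotR_gmul _ hq]
      simp only [part2AltStep, dirsB_get]
      simp [gmul_assoc]
    · rw [show part2Step (w, p) (op, val) = (w, p) by
        simp [part2Step, hF, hE, hS, hW, hN, hL, hR]]
      rw [ih hpret]
      simp [part2AltStep, dirsB_get, hF, hE, hS, hW, hN, hL, hR]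

-- ===== VERDICT (by name: the statement is the Claim_ definition above) =====
theorem part2_spec : Claim_equal_part2 := by
  intro instr _ hpre
  unfold Spec_part2 part2 part2_alt
  rw [List.foldl_reverse]
  have h := affB_correct instr hpre (10, 1) (0, 0)
  simp only [affB] at h
  show |(List.foldl part2Step ((10, 1), (0, 0)) instr).2.1| +
        |(List.foldl part2Step ((10, 1), (0, 0)) instr).2.2| = _
  rw [h]
  simp [add_comm]
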